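-- pv_equiv track=rewrite | github.com/rushabhporwal29/Plagarism-Detection-System | pds.py | detect_plagiarism
-- ===== SOURCE A (Python) =====
-- def preprocess_text(text):
--     # Remove punctuation and convert to lowercase
--     text = text.lower()
--     text = ''.join(c for c in text if c.isalnum() or c.isspace())
--     return text
--
-- def calculate_lcs_length(text1, text2):
--     m = len(text1)
--     n = len(text2)
--     lcs_matrix = [[0] * (n + 1) for _ in range(m + 1)]
--
--     for i in range(1, m + 1):
--         for j in range(1, n + 1):
--             if text1[i - 1] == text2[j - 1]:
--                 lcs_matrix[i][j] = lcs_matrix[i - 1][j - 1] + 1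
--             else:
--                 lcs_matrix[i][j] = max(lcs_matrix[i - 1][j], lcs_matrix[i][j - 1])
--
--     return lcs_matrix[m][n]
--
-- def detect_plagiarism(essays, threshold):
--     num_essays = len(essays)
--     plagiarism_cases = []
--
--     for i in range(num_essays):
--         for j in range(i + 1, num_essays):
--             essay1 = preprocess_text(essays[i])
--             essay2 = preprocess_text(essays[j])
--             lcs_length = calculate_lcs_length(essay1, essay2)
--
--             if lcs_length >= threshold:
--                 plagiarism_cases.append((i, j, lcs_length))
--
--     return plagiarism_cases
-- ===== SOURCE B (Python) =====
-- def _lcs_memo(t1, t2):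
--     # Top-down recursion on prefix lengths (i, j), memoized in a dict.
--     memo = {}
--
--     def lcs(i, j):
--         key = (i, j)
--         if key in memo:
--             return memo[key]
--         if i == 0 or j == 0:
--             v = 0
--         elif t1[i - 1] == t2[j - 1]:
--             v = lcs(i - 1, j - 1) + 1
--         else:
--             a = lcs(i - 1, j)
--             b = lcs(i, j - 1)
--             v = a if a >= b else b
--         memo[key] = v
--         return v
--
--     return lcs(len(t1), len(t2))
--
-- def detect_plagiarism(essays, threshold):
--     cleaned = []
--     for e in essays:
--         e = e.lower()
--         cleaned.append(''.join(c for c in e if c.isalnum() or c.isspace()))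
--     plagiarism_cases = []
--     n = len(cleaned)
--     for i in range(n):
--         for j in range(i + 1, n):
--             lcs_length = _lcs_memo(cleaned[i], cleaned[j])
--             if lcs_length >= threshold:
--                 plagiarism_cases.append((i, j, lcs_length))
--     return plagiarism_cases
-- ===== Notes on version B (the rewrite author's own statement) =====
-- stated objective: alternative
-- what changed: B replaces A's bottom-up (m+1)x(n+1) LCS table fill with a top-down recursive lcs(i, j) memoized in a dict keyed by (i, j) (demand-driven: only reachable subproblems are computed, no matrix is allocated), and hoists the per-essay preprocessing out of the nested pair loops so each essay is cleaned once instead of once per pair.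
import Mathlib
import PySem

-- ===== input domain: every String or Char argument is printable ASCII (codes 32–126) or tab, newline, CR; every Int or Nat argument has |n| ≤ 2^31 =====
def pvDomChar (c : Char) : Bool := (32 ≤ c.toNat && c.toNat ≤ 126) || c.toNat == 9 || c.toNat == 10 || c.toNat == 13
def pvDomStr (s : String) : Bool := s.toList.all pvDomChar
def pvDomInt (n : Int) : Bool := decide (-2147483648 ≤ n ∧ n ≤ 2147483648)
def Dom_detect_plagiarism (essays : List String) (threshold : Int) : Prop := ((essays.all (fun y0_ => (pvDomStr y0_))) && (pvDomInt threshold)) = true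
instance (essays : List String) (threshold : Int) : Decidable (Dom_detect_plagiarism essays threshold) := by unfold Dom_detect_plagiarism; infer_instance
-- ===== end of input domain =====

-- B replaces A's bottom-up (m+1)×(n+1) LCS table by a top-down recursive lcs(i,j) memoized in a
-- dict keyed by (i,j), and hoists the per-essay preprocessing out of the pair loops (objective: alternative).

-- ===== PORT A =====
def pvPreprocess (text : String) : String :=
  String.ofList ((PySem.Str.lower text).toList.filter (fun c => PySem.Chars.isalnum c || PySem.Chars.isspace c))

def pvMatGet (mat : List (List Int)) (i j : Nat) : Int := (mat.getD i []).getD j 0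
def pvMatSet (mat : List (List Int)) (i j : Nat) (v : Int) : List (List Int) :=
  mat.set i ((mat.getD i []).set j v)

def calculate_lcs_length (text1 text2 : String) : Int :=
  let l1 := text1.toList
  let l2 := text2.toList
  let m := l1.length
  let n := l2.length
  let mat0 : List (List Int) := List.replicate (m+1) (List.replicate (n+1) 0)
  let mat := (PySem.List.pyRange 1 ((m:Int)+1) 1).foldl (fun mat i =>
    (PySem.List.pyRange 1 ((n:Int)+1) 1).foldl (fun mat j =>
      -- text1[i-1] / text2[j-1] and all matrix indices are nonnegative and in range here,
      -- so getD/.toNat is exact for Python's indexing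
      if l1.getD (i-1).toNat ' ' == l2.getD (j-1).toNat ' ' then
        pvMatSet mat i.toNat j.toNat (pvMatGet mat (i.toNat-1) (j.toNat-1) + 1)
      else
        pvMatSet mat i.toNat j.toNat (max (pvMatGet mat (i.toNat-1) j.toNat) (pvMatGet mat i.toNat (j.toNat-1)))
      ) mat) mat0
  pvMatGet mat m n

def detect_plagiarism (essays : List String) (threshold : Int) : List (Int × Int × Int) :=
  let num : Int := essays.length
  (PySem.List.pyRange 0 num 1).foldl (fun acc i =>
    (PySem.List.pyRange (i+1) num 1).foldl (fun acc j =>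
      let essay1 := pvPreprocess (PySem.List.pyGetD essays i "")
      let essay2 := pvPreprocess (PySem.List.pyGetD essays j "")
      let L := calculate_lcs_length essay1 essay2
      if L ≥ threshold then acc ++ [(i, j, L)] else acc) acc) []

-- ===== PORT B =====
def pvClean (e : String) : String :=
  String.ofList ((PySem.Str.lower e).toList.filter (fun c => PySem.Chars.isalnum c || PySem.Chars.isspace c))

-- top-down lcs(i, j) of Source B: the memo dict is threaded through explicitly; keys are the
-- Python ints (i, j), indices i-1 / j-1 are in range so .getD is exact for t1[i-1] / t2[j-1]
def lcsGo (l1 l2 : List Char) (i j : Nat) (memo : PySem.Dict (Int × Int) Int) :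
    Int × PySem.Dict (Int × Int) Int :=
  match memo.get? ((i : Int), (j : Int)) with
  | some v => (v, memo)
  | none =>
    match i, j with
    | 0, j => (0, memo.insert ((0 : Int), (j : Int)) 0)
    | i + 1, 0 => (0, memo.insert (((i + 1 : Nat) : Int), (0 : Int)) 0)
    | i + 1, j + 1 =>
      if l1.getD i ' ' == l2.getD j ' ' then
        let r := lcsGo l1 l2 i j memo
        let v := r.1 + 1
        (v, r.2.insert (((i + 1 : Nat) : Int), ((j + 1 : Nat) : Int)) v)
      else
        let ra := lcsGo l1 l2 i (j + 1) memo
        let rb := lcsGo l1 l2 (i + 1) j ra.2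
        let v := if ra.1 ≥ rb.1 then ra.1 else rb.1
        (v, rb.2.insert (((i + 1 : Nat) : Int), ((j + 1 : Nat) : Int)) v)
  termination_by (i, j)

def pvLcsB (t1 t2 : String) : Int :=
  (lcsGo t1.toList t2.toList t1.toList.length t2.toList.length PySem.Dict.empty).1

def detect_plagiarism_alt (essays : List String) (threshold : Int) : List (Int × Int × Int) :=
  let cleaned := essays.foldl (fun acc e => acc ++ [pvClean e]) []
  let n : Int := cleaned.length
  (PySem.List.pyRange 0 n 1).foldl (fun acc i =>
    (PySem.List.pyRange (i+1) n 1).foldl (fun acc j =>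
      let L := pvLcsB (PySem.List.pyGetD cleaned i "") (PySem.List.pyGetD cleaned j "")
      if L ≥ threshold then acc ++ [(i, j, L)] else acc) acc) []

-- ===== PRECONDITION & SPEC =====
def Spec_detect_plagiarism (essays : List String) (threshold : Int) (out : List (Int × Int × Int)) : Prop := out = detect_plagiarism_alt essays threshold
instance (essays : List String) (threshold : Int) (out : List (Int × Int × Int)) : Decidable (Spec_detect_plagiarism essays threshold out) := by unfold Spec_detect_plagiarism; infer_instance

-- ===== CLAIM (what is proved, stated in full; the proofs are below) =====
def Claim_equal_detect_plagiarism : Prop := ∀ (essays : List String) (threshold : Int), Dom_detect_plagiarism essays threshold → Spec_detect_plagiarism essays threshold (detect_plagiarism essays threshold)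

-- ===== LEMMAS AND PROOFS =====

-- the abstract "next DP row" A's inner loop computes:
-- pvRowNext c1 left diag ps cs = the new row entries from position j on, where left = new[j-1],
-- diag = prev[j-1], ps = prev[j..], cs = text2[j-1..]
def pvRowNext (c1 : Char) : Int → Int → List Int → List Char → List Int
  | left, diag, p :: ps, c2 :: cs =>
      (if c1 == c2 then diag + 1 else max p left) ::
        pvRowNext c1 (if c1 == c2 then diag + 1 else max p left) p ps cs
  | _, _, _, _ => []

def pvNewRow (c1 : Char) (prev : List Int) (l2 : List Char) : List Int :=
  0 :: pvRowNext c1 0 0 prev.tail l2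

-- the pure prefix LCS recurrence: lcsP l1 l2 i j = LCS length of l1[:i] and l2[:j]
def lcsP (l1 l2 : List Char) : Nat → Nat → Int
  | 0, _ => 0
  | _ + 1, 0 => 0
  | i + 1, j + 1 =>
      if l1.getD i ' ' == l2.getD j ' ' then lcsP l1 l2 i j + 1
      else max (lcsP l1 l2 i (j + 1)) (lcsP l1 l2 (i + 1) j)
  termination_by i j => (i, j)

lemma lcsP_zero_left (l1 l2 : List Char) (j : Nat) : lcsP l1 l2 0 j = 0 := by
  simp [lcsP]

lemma lcsP_zero_right (l1 l2 : List Char) (i : Nat) : lcsP l1 l2 i 0 = 0 := by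
  cases i <;> simp [lcsP]

lemma pvRowNext_length (c1 : Char) (left diag : Int) (ps : List Int) (cs : List Char)
    (h : ps.length = cs.length) : (pvRowNext c1 left diag ps cs).length = cs.length := by
  induction cs generalizing ps left diag with
  | nil => cases ps <;> simp [pvRowNext] at h ⊢
  | cons c cs ih =>
      cases ps with
      | nil => simp at h
      | cons p ps => simp [pvRowNext]; exact ih _ _ _ (by simpa using h)

-- ---- A's inner loop over the matrix, reduced to a row computation ----
lemma a_inner (c1 : Char) (l2 : List Char) (prev : List Int) :
    ∀ (cs cpref : List Char) (ps pref qref : List Int) (left diag : Int),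
    qref.length = pref.length → cpref.length = pref.length →
    ps.length = cs.length → l2 = cpref ++ cs → prev = (qref ++ [diag]) ++ ps →
    (PySem.List.pyRange ((pref.length : Int) + 1) ((l2.length : Int) + 1) 1).foldl
      (fun (r : List Int) j =>
        if c1 == l2.getD (j-1).toNat ' ' then
          r.set j.toNat (prev.getD (j.toNat - 1) 0 + 1)
        else
          r.set j.toNat (max (prev.getD j.toNat 0) (r.getD (j.toNat - 1) 0)))
      ((pref ++ [left]) ++ List.replicate cs.length 0)
    = (pref ++ [left]) ++ pvRowNext c1 left diag ps cs := by
  intro cs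
  induction cs with
  | nil =>
      intro cpref ps pref qref left diag hq hc hp hl2 hprev
      cases ps with
      | cons p ps => simp at hp
      | nil =>
          rw [PySem.List.pyRange_one_eq_nil (by simp [hl2, hc])]
          simp [pvRowNext]
  | cons c cs ih =>
      intro cpref ps pref qref left diag hq hc hp hl2 hprev
      cases ps with
      | nil => simp at hp
      | cons p ps =>
        have hlen2 : (l2.length : Int) = (pref.length : Int) + 1 + cs.length := by
          simp [hl2, hc]; omega
        rw [PySem.List.pyRange_one_cons (by omega)]
        simp only [List.foldl_cons]
        have ht1 : ((pref.length : Int) + 1).toNat = pref.length + 1 := by omega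
        have ht2 : ((pref.length : Int) + 1).toNat - 1 = pref.length := by omega
        have hchar : l2.getD ((pref.length : Int) + 1 - 1).toNat ' ' = c := by
          have : ((pref.length : Int) + 1 - 1).toNat = cpref.length := by omega
          rw [this, hl2]; simp [List.getD]
        have hdiag : prev.getD (((pref.length : Int) + 1).toNat - 1) 0 = diag := by
          rw [ht2, hprev, ← hq, List.append_assoc]; simp [List.getD]
        have hpp : prev.getD ((pref.length : Int) + 1).toNat 0 = p := by
          have : ((pref.length : Int) + 1).toNat = (qref ++ [diag]).length := by simp [hq]
          rw [this, hprev]; simp [List.getD]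
        have hleft : ((pref ++ [left]) ++ List.replicate (c :: cs).length 0).getD
            (((pref.length : Int) + 1).toNat - 1) 0 = left := by
          rw [ht2, List.append_assoc]; simp [List.getD]
        have hset : ∀ v : Int, ((pref ++ [left]) ++ List.replicate (c :: cs).length 0).set
            ((pref.length : Int) + 1).toNat v
            = ((pref ++ [left]) ++ [v]) ++ List.replicate cs.length 0 := by
          intro v
          have : ((pref.length : Int) + 1).toNat = (pref ++ [left]).length := by simp
          rw [this]; simp [List.replicate_succ]
        have hprev' : prev = ((qref ++ [diag]) ++ [p]) ++ ps := by simp [hprev]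
        have hl2' : l2 = (cpref ++ [c]) ++ cs := by simp [hl2]
        have hidx : (pref.length : Int) + 1 + 1 = (((pref ++ [left]).length : Int)) + 1 := by simp
        by_cases hcc : c1 == c
        · rw [hchar] at *
          simp only [hcc, if_pos, hdiag, hset]
          rw [hidx, ih (cpref ++ [c]) ps (pref ++ [left]) (qref ++ [diag]) (diag + 1) p
            (by simp [hq]) (by simp [hc]) (by simpa using hp) hl2' hprev']
          simp [pvRowNext, hcc]
        · rw [hchar] at *
          simp only [hcc, Bool.false_eq_true, if_false, hpp, hleft, hset]
          rw [hidx, ih (cpref ++ [c]) ps (pref ++ [left]) (qref ++ [diag]) (max p left) p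
            (by simp [hq]) (by simp [hc]) (by simpa using hp) hl2' hprev']
          simp [pvRowNext, hcc]

-- ---- the matrix fold only ever rewrites row i: reduce it to a fold on that row ----
lemma matfold (step : List Int → List Int → Int → List Int) (i : Nat) (hi : 0 < i) :
    ∀ (js : List Int) (mat : List (List Int)), i < mat.length →
    js.foldl (fun m j => m.set i (step (m.getD (i-1) []) (m.getD i []) j)) mat
    = mat.set i (js.foldl (fun r j => step (mat.getD (i-1) []) r j) (mat.getD i [])) := by
  intro js
  induction js with
  | nil => intro mat h; exact (by simp [List.getD, h] : mat.set i (mat.getD i []) = mat).symm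
  | cons j js ih =>
      intro mat hlen
      simp only [List.foldl_cons]
      rw [ih _ (by simpa using hlen)]
      have h1 : (mat.set i (step (mat.getD (i-1) []) (mat.getD i []) j)).getD (i-1) []
          = mat.getD (i-1) [] := by
        simp [List.getD, List.getElem?_set_ne (by omega : i ≠ i - 1)]
      have h2 : (mat.set i (step (mat.getD (i-1) []) (mat.getD i []) j)).getD i []
          = step (mat.getD (i-1) []) (mat.getD i []) j := by
        simp [List.getD, hlen]
      rw [h1, h2, List.set_set]

-- rows of the DP table below row i, as computed forward from row i
def pvRowsFrom (l2 : List Char) : List Int → List Char → List (List Int)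
  | _, [] => []
  | prev, c :: cs => pvNewRow c prev l2 :: pvRowsFrom l2 (pvNewRow c prev l2) cs

-- ---- A's outer loop computes pvRowsFrom ----
lemma a_outer (l1 l2 : List Char) :
    ∀ (cs1 cpref1 : List Char) (prefRows : List (List Int)) (ps : List Int),
    cpref1.length = prefRows.length → ps.length = l2.length → l1 = cpref1 ++ cs1 →
    (PySem.List.pyRange ((prefRows.length : Int) + 1) ((l1.length : Int) + 1) 1).foldl
      (fun mat i =>
        (PySem.List.pyRange 1 ((l2.length : Int) + 1) 1).foldl (fun mat j =>
          if l1.getD (i-1).toNat ' ' == l2.getD (j-1).toNat ' ' then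
            pvMatSet mat i.toNat j.toNat (pvMatGet mat (i.toNat-1) (j.toNat-1) + 1)
          else
            pvMatSet mat i.toNat j.toNat
              (max (pvMatGet mat (i.toNat-1) j.toNat) (pvMatGet mat i.toNat (j.toNat-1)))
          ) mat)
      ((prefRows ++ [0 :: ps]) ++ List.replicate cs1.length (List.replicate (l2.length + 1) 0))
    = (prefRows ++ [0 :: ps]) ++ pvRowsFrom l2 (0 :: ps) cs1 := by
  intro cs1
  induction cs1 with
  | nil =>
      intro cpref1 prefRows ps hc hp hl1
      have h0 : l1.length = prefRows.length := by rw [hl1]; simp [hc]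
      rw [show PySem.List.pyRange ((prefRows.length : Int) + 1) ((l1.length : Int) + 1) 1 = []
        from PySem.List.pyRange_one_eq_nil (by omega)]
      simp [pvRowsFrom]
  | cons c cs1 ih =>
      intro cpref1 prefRows ps hc hp hl1
      have h0 : l1.length = prefRows.length + 1 + cs1.length := by rw [hl1]; simp [hc]; omega
      have hlen1 : (l1.length : Int) = (prefRows.length : Int) + 1 + cs1.length := by omega
      rw [show PySem.List.pyRange ((prefRows.length : Int) + 1) ((l1.length : Int) + 1) 1
          = ((prefRows.length : Int) + 1) :: PySem.List.pyRange ((prefRows.length : Int) + 1 + 1) ((l1.length : Int) + 1) 1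
        from PySem.List.pyRange_one_cons (by omega)]
      simp only [List.foldl_cons]
      -- name the state and the fixed index
      set mat : List (List Int) :=
        (prefRows ++ [0 :: ps]) ++ List.replicate (c :: cs1).length (List.replicate (l2.length + 1) 0) with hmat
      have hil : ((prefRows.length : Int) + 1).toNat = prefRows.length + 1 := by omega
      have hchar : l1.getD ((prefRows.length : Int) + 1 - 1).toNat ' ' = c := by
        have : ((prefRows.length : Int) + 1 - 1).toNat = cpref1.length := by omega
        rw [this, hl1]; simp [List.getD]
      -- the inner fold is matfold's shape
      have hbody : (fun (m : List (List Int)) (j : Int) =>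
            if l1.getD ((prefRows.length : Int) + 1 - 1).toNat ' ' == l2.getD (j-1).toNat ' ' then
              pvMatSet m (((prefRows.length : Int) + 1)).toNat j.toNat
                (pvMatGet m ((((prefRows.length : Int) + 1)).toNat - 1) (j.toNat - 1) + 1)
            else
              pvMatSet m (((prefRows.length : Int) + 1)).toNat j.toNat
                (max (pvMatGet m ((((prefRows.length : Int) + 1)).toNat - 1) j.toNat)
                     (pvMatGet m (((prefRows.length : Int) + 1)).toNat (j.toNat - 1))))
          = (fun (m : List (List Int)) (j : Int) =>
              m.set (prefRows.length + 1)
                ((fun (pr r : List Int) (j : Int) =>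
                  if c == l2.getD (j-1).toNat ' ' then
                    r.set j.toNat (pr.getD (j.toNat - 1) 0 + 1)
                  else
                    r.set j.toNat (max (pr.getD j.toNat 0) (r.getD (j.toNat - 1) 0)))
                 (m.getD (prefRows.length + 1 - 1) []) (m.getD (prefRows.length + 1) []) j)) := by
        funext m j
        rw [hchar, hil]
        unfold pvMatSet pvMatGet
        split <;> (rename_i h; simp [beq_iff_eq] at h; simp [h])
      rw [hbody, matfold (fun (pr r : List Int) (j : Int) =>
            if c == l2.getD (j-1).toNat ' ' then
              r.set j.toNat (pr.getD (j.toNat - 1) 0 + 1)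
            else
              r.set j.toNat (max (pr.getD j.toNat 0) (r.getD (j.toNat - 1) 0)))
          (prefRows.length + 1) (by omega) (PySem.List.pyRange 1 ((l2.length : Int) + 1) 1) mat
          (by rw [hmat]; simp)]
      have hgetprev : mat.getD (prefRows.length + 1 - 1) [] = 0 :: ps := by
        rw [hmat]; simp [List.getD]
      have hgetcur : mat.getD (prefRows.length + 1) [] = List.replicate (l2.length + 1) 0 := by
        have h1 : prefRows.length + 1 = (prefRows ++ [0 :: ps]).length := by simp
        rw [hmat, h1, List.replicate_succ]
        simp [List.getD]
      rw [hgetprev, hgetcur]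
      have hinner := a_inner c l2 (0 :: ps) l2 [] ps [] [] 0 0 rfl rfl
        (by omega) (by simp) (by simp)
      simp only [List.nil_append, List.length_nil, Nat.cast_zero, zero_add] at hinner
      have hrepl : (List.replicate (l2.length + 1) 0 : List Int) = [0] ++ List.replicate l2.length 0 := by
        simp [List.replicate_succ]
      rw [hrepl, hinner]
      -- write the updated matrix in the induction-hypothesis shape
      have hsetmat : mat.set (prefRows.length + 1) ([0] ++ pvRowNext c 0 0 ps l2)
          = ((prefRows ++ [0 :: ps]) ++ [0 :: pvRowNext c 0 0 ps l2])
            ++ List.replicate cs1.length (List.replicate (l2.length + 1) 0) := by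
        have h1 : prefRows.length + 1 = (prefRows ++ [0 :: ps]).length := by simp
        rw [hmat, h1, List.replicate_succ]
        simp
        rw [List.replicate_succ]
        rfl
      have hidx : (prefRows.length : Int) + 1 + 1 = (((prefRows ++ [0 :: ps]).length : Int)) + 1 := by
        simp
      rw [hsetmat, hidx, ih (cpref1 ++ [c]) (prefRows ++ [0 :: ps]) (pvRowNext c 0 0 ps l2)
        (by simp [hc]) (pvRowNext_length c 0 0 ps l2 hp) (by simp [hl1])]
      simp [pvRowsFrom, pvNewRow]

-- the last DP row, read off the rows list
lemma rowsFrom_getD (l2 : List Char) :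
    ∀ (cs : List Char) (prev : List Int),
    (([prev] ++ pvRowsFrom l2 prev cs).getD cs.length []) =
      cs.foldl (fun p c => pvNewRow c p l2) prev := by
  intro cs
  induction cs with
  | nil => intro prev; simp [pvRowsFrom, List.getD]
  | cons c cs ih =>
      intro prev
      simpa [pvRowsFrom, List.getD] using ih (pvNewRow c prev l2)

-- ---- the DP row transition realises the lcsP recurrence ----
lemma rowNext_lcsP (l1 l2 : List Char) (i : Nat) :
    ∀ (cs : List Char) (j0 : Nat), cs = l2.drop j0 →
    pvRowNext (l1.getD i ' ') (lcsP l1 l2 (i+1) j0) (lcsP l1 l2 i j0)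
      ((List.range cs.length).map (fun k => lcsP l1 l2 i (j0+1+k))) cs
    = (List.range cs.length).map (fun k => lcsP l1 l2 (i+1) (j0+1+k)) := by
  intro cs
  induction cs with
  | nil => intro j0 _; simp [pvRowNext]
  | cons c cs ih =>
      intro j0 hcs
      have hchar : l2.getD j0 ' ' = c := by
        have h : (List.drop j0 l2)[0]? = l2[j0 + 0]? := List.getElem?_drop
        rw [← hcs] at h
        simp at h
        simp [List.getD, ← h]
      have hstep : (if l1.getD i ' ' == c then lcsP l1 l2 i j0 + 1
            else max (lcsP l1 l2 i (j0+1)) (lcsP l1 l2 (i+1) j0)) = lcsP l1 l2 (i+1) (j0+1) := by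
        rw [lcsP, hchar]
      have htail : cs = l2.drop (j0+1) := by
        have h : List.drop 1 (List.drop j0 l2) = List.drop (j0 + 1) l2 := List.drop_drop
        rw [← hcs] at h
        simpa using h
      have hmap : ∀ f : Nat → Int, (List.range (cs.length + 1)).map (fun k => f (j0+1+k))
          = f (j0+1) :: (List.range cs.length).map (fun k => f ((j0+1)+1+k)) := by
        intro f
        rw [List.range_succ_eq_map]
        simp only [List.map_cons, List.map_map]
        congr 1
        apply List.map_congr_left
        intro k _
        simp only [Function.comp_apply]
        congr 1
        omega
      simp only [List.length_cons, hmap, pvRowNext, hstep]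
      congr 1
      exact ih (j0+1) htail

lemma newRow_lcsP (l1 l2 : List Char) (i : Nat) :
    pvNewRow (l1.getD i ' ') ((List.range (l2.length+1)).map (fun j => lcsP l1 l2 i j)) l2
    = (List.range (l2.length+1)).map (fun j => lcsP l1 l2 (i+1) j) := by
  have hmap : ∀ i' : Nat, (List.range (l2.length + 1)).map (fun j => lcsP l1 l2 i' j)
      = lcsP l1 l2 i' 0 :: (List.range l2.length).map (fun k => lcsP l1 l2 i' (0+1+k)) := by
    intro i'
    rw [List.range_succ_eq_map]
    simp only [List.map_cons, List.map_map]
    congr 1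
    apply List.map_congr_left; intro k _; simp only [Function.comp_apply]; congr 1; omega
  rw [hmap i, hmap (i+1)]
  have h0 : lcsP l1 l2 i 0 = 0 := lcsP_zero_right l1 l2 i
  have h0' : lcsP l1 l2 (i+1) 0 = 0 := lcsP_zero_right l1 l2 (i+1)
  have hlen : l2.length = (l2.drop 0).length := by simp
  rw [pvNewRow, h0', List.tail_cons]
  congr 1
  calc pvRowNext (l1.getD i ' ') 0 0 ((List.range l2.length).map (fun k => lcsP l1 l2 i (0+1+k))) l2
      = pvRowNext (l1.getD i ' ') (lcsP l1 l2 (i+1) 0) (lcsP l1 l2 i 0)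
          ((List.range (l2.drop 0).length).map (fun k => lcsP l1 l2 i (0+1+k))) (l2.drop 0) := by
        rw [h0, h0']; simp
    _ = (List.range (l2.drop 0).length).map (fun k => lcsP l1 l2 (i+1) (0+1+k)) := by
        exact rowNext_lcsP l1 l2 i (l2.drop 0) 0 rfl
    _ = (List.range l2.length).map (fun k => lcsP l1 l2 (i+1) (0+1+k)) := by simp

-- ---- folding all rows gives the last lcsP row ----
lemma foldl_rows_lcsP (l1 l2 : List Char) :
    ∀ (cs1 : List Char) (i : Nat), i ≤ l1.length → cs1 = l1.drop i →
    cs1.foldl (fun p c => pvNewRow c p l2) ((List.range (l2.length+1)).map (fun j => lcsP l1 l2 i j))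
    = (List.range (l2.length+1)).map (fun j => lcsP l1 l2 l1.length j) := by
  intro cs1
  induction cs1 with
  | nil =>
      intro i hi hd
      have : l1.length ≤ i := by
        by_contra hlt
        push_neg at hlt
        have := List.drop_eq_nil_iff.mp hd.symm
        omega
      have : i = l1.length := by omega
      rw [this]
      simp
  | cons c cs ih =>
      intro i hi hd
      have hchar : l1.getD i ' ' = c := by
        have h : (List.drop i l1)[0]? = l1[i + 0]? := List.getElem?_drop
        rw [← hd] at h
        simp at h
        simp [List.getD, ← h]
      have hilt : i < l1.length := by
        by_contra hge
        push_neg at hge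
        have : l1.drop i = [] := List.drop_eq_nil_iff.mpr (by omega)
        rw [this] at hd; simp at hd
      have htail : cs = l1.drop (i+1) := by
        have h : List.drop 1 (List.drop i l1) = List.drop (i + 1) l1 := List.drop_drop
        rw [← hd] at h
        simpa using h
      simp only [List.foldl_cons]
      rw [← hchar, newRow_lcsP l1 l2 i]
      exact ih (i+1) (by omega) htail

-- ---- memoisation is sound: every memo entry is an lcsP value ----
def MemoOK (l1 l2 : List Char) (memo : PySem.Dict (Int × Int) Int) : Prop :=
  ∀ (i j : Nat) (v : Int), memo.get? ((i : Int), (j : Int)) = some v → v = lcsP l1 l2 i j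

lemma memoOK_insert (l1 l2 : List Char) (memo : PySem.Dict (Int × Int) Int)
    (h : MemoOK l1 l2 memo) (i j : Nat) (v : Int) (hv : v = lcsP l1 l2 i j) :
    MemoOK l1 l2 (memo.insert ((i : Int), (j : Int)) v) := by
  intro i' j' w hw
  rw [PySem.Dict.get?_insert] at hw
  split at hw
  · rename_i heq
    have h1 : i' = i ∧ j' = j := by
      constructor <;> [have := congrArg Prod.fst heq; have := congrArg Prod.snd heq] <;>
        simp at this <;> omega
    obtain ⟨rfl, rfl⟩ := h1
    cases hw; exact hv
  · exact h _ _ _ hw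

lemma lcsGo_good (l1 l2 : List Char) :
    ∀ (n : Nat) (i j : Nat) (memo : PySem.Dict (Int × Int) Int), i + j ≤ n → MemoOK l1 l2 memo →
    (lcsGo l1 l2 i j memo).1 = lcsP l1 l2 i j ∧ MemoOK l1 l2 (lcsGo l1 l2 i j memo).2 := by
  intro n
  induction n with
  | zero =>
      intro i j memo hn hok
      have hi : i = 0 := by omega
      have hj : j = 0 := by omega
      subst hi; subst hj
      rw [lcsGo.eq_def]
      cases hc : memo.get? ((0 : Int), (0 : Int)) with
      | some v => exact ⟨hok 0 0 v hc, hok⟩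
      | none =>
          exact ⟨(lcsP_zero_left l1 l2 0).symm,
            memoOK_insert l1 l2 memo hok 0 0 0 (lcsP_zero_left l1 l2 0).symm⟩
  | succ n ihn =>
      intro i j memo hn hok
      rw [lcsGo.eq_def]
      cases hc : memo.get? ((i : Int), (j : Int)) with
      | some v => exact ⟨hok i j v hc, hok⟩
      | none =>
          cases i with
          | zero =>
              exact ⟨(lcsP_zero_left l1 l2 j).symm,
                memoOK_insert l1 l2 memo hok 0 j 0 (lcsP_zero_left l1 l2 j).symm⟩
          | succ i =>
              cases j with
              | zero =>
                  exact ⟨(lcsP_zero_right l1 l2 (i+1)).symm,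
                    memoOK_insert l1 l2 memo hok (i+1) 0 0 (lcsP_zero_right l1 l2 (i+1)).symm⟩
              | succ j =>
                  by_cases hch : l1.getD i ' ' == l2.getD j ' '
                  · simp only [hch, if_pos]
                    obtain ⟨hv, hm⟩ := ihn i j memo (by omega) hok
                    have hval : (lcsGo l1 l2 i j memo).1 + 1 = lcsP l1 l2 (i+1) (j+1) := by
                      rw [hv, lcsP, if_pos hch]
                    exact ⟨hval, memoOK_insert l1 l2 _ hm (i+1) (j+1) _ hval⟩
                  · simp only [hch, Bool.false_eq_true, if_false]
                    obtain ⟨hva, hma⟩ := ihn i (j+1) memo (by omega) hok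
                    obtain ⟨hvb, hmb⟩ := ihn (i+1) j (lcsGo l1 l2 i (j+1) memo).2 (by omega) hma
                    have hval : (if (lcsGo l1 l2 i (j+1) memo).1 ≥ (lcsGo l1 l2 (i+1) j (lcsGo l1 l2 i (j+1) memo).2).1
                          then (lcsGo l1 l2 i (j+1) memo).1
                          else (lcsGo l1 l2 (i+1) j (lcsGo l1 l2 i (j+1) memo).2).1)
                        = lcsP l1 l2 (i+1) (j+1) := by
                      rw [hva, hvb, lcsP]
                      simp only [hch, Bool.false_eq_true, if_false]
                      rw [max_def]
                      split <;> split <;> omega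
                    exact ⟨hval, memoOK_insert l1 l2 _ hmb (i+1) (j+1) _ hval⟩

lemma pvLcsB_eq_lcsP (t1 t2 : String) :
    pvLcsB t1 t2 = lcsP t1.toList t2.toList t1.toList.length t2.toList.length := by
  have h := lcsGo_good t1.toList t2.toList (t1.toList.length + t2.toList.length)
    t1.toList.length t2.toList.length PySem.Dict.empty le_rfl
    (by intro i j v hv; rw [PySem.Dict.get?_empty] at hv; simp at hv)
  exact h.1

-- ---- A's whole LCS computation equals B's memoized recursion ----
lemma pvLcs_eq (t1 t2 : String) : calculate_lcs_length t1 t2 = pvLcsB t1 t2 := by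
  simp only [calculate_lcs_length]
  have ha := a_outer t1.toList t2.toList t1.toList [] [] (List.replicate t2.toList.length 0)
    rfl (by simp) (by simp)
  simp only [List.nil_append, List.length_nil, Nat.cast_zero, zero_add] at ha
  have hinit : (List.replicate (t1.toList.length + 1) (List.replicate (t2.toList.length + 1) 0) : List (List Int))
      = [0 :: List.replicate t2.toList.length 0] ++
        List.replicate t1.toList.length (List.replicate (t2.toList.length + 1) 0) := by
    rw [List.replicate_succ]; simp [List.replicate_succ]
  rw [hinit, ha]
  unfold pvMatGet
  rw [rowsFrom_getD t2.toList t1.toList (0 :: List.replicate t2.toList.length 0)]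
  have hrow0 : (0 :: List.replicate t2.toList.length 0 : List Int)
      = (List.range (t2.toList.length+1)).map (fun j => lcsP t1.toList t2.toList 0 j) := by
    have hz : ∀ j : Nat, lcsP t1.toList t2.toList 0 j = 0 := lcsP_zero_left t1.toList t2.toList
    simp [hz, List.replicate_succ]
  rw [hrow0, foldl_rows_lcsP t1.toList t2.toList t1.toList 0 (by omega) (by simp)]
  rw [pvLcsB_eq_lcsP]
  simp [List.getD]

lemma clean_empty : pvClean "" = "" := by decide

lemma cleaned_eq_map : ∀ (xs : List String) (acc : List String),
    xs.foldl (fun acc e => acc ++ [pvClean e]) acc = acc ++ xs.map pvClean := by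
  intro xs
  induction xs with
  | nil => intro acc; simp
  | cons x xs ih => intro acc; simp [ih]

-- ===== VERDICT (by name: the statement is the Claim_ definition above) =====
theorem detect_plagiarism_spec : Claim_equal_detect_plagiarism := by
  intro essays threshold _hdom
  unfold Spec_detect_plagiarism detect_plagiarism detect_plagiarism_alt
  dsimp only
  rw [cleaned_eq_map essays [], List.nil_append]
  have hget : ∀ k : Int, PySem.List.pyGetD (essays.map pvClean) k ""
      = pvClean (PySem.List.pyGetD essays k "") := by
    intro k
    have h := PySem.List.pyGetD_map pvClean essays k ""
    rw [clean_empty] at h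
    exact h
  have hmaplen : ((essays.map pvClean).length : Int) = (essays.length : Int) := by simp
  rw [hmaplen]
  apply PySem.List.foldl_congr_mem
  intro acc i _
  apply PySem.List.foldl_congr_mem
  intro acc j _
  rw [hget, hget, pvLcs_eq]
  rfl
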